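-- pv_equiv track=rewrite | github.com/claudiojacobo/resolvent-degree | Demos/helper_functions.py | partitions_as_dicts
-- ===== SOURCE A (Python) =====
-- def partitions(n, k=1):
--     '''
--     Generate all integer partitions of n with parts no smaller than k.
--
--     A partition of an integer n is a way of writing n as a sum of positive integers,
--     where the order of terms does not matter. This function generates all such
--     partitions where each part is at least k.
--
--     Args:
--         n (int): The positive integer to partition. Must be ≥ 0.
--         k (int): The minimum value for each part in the partition. Must be ≥ 1.
--                 Defaults to 1, which generates all partitions of n.
--
--     Returns:
--         list[tuple[int, ...]]: A list of tuples, where each tuple represents a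
--             partition of n as a sequence of integers in non-increasing order.
--             Each integer in the tuple is ≥ k.
--     '''
--     result = []
--     if k <= n:
--         result = [(n,)]
--     for i in range(n//2,k-1,-1):
--         result += [ p + (i,) for p in partitions(n-i,i)]
--     return result
--
-- def partitions_as_dicts(n):
--     '''
--     Returns all integer partitions of `n` as dictionaries.
--
--     Each partition is represented as a dictionary where keys are integers from 1 to n,
--     and the value for each key is the multiplicity (count) of that number in the partition.
--     For example, the partition 4 + 3 + 3 + 2 = 12 is represented as:
--         {1: 0, 2: 1, 3: 2, 4: 1, 5: 0, ..., 12: 0}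
--
--     Args:
--         n (int): The integer to partition. Must be ≥ 1.
--
--     Returns:
--         list[dict[int, int]]: A list of dictionaries encoding the partitions of `n`.
--     '''
--     tuples = []
--     for partition in partitions(n):
--         counts = { i+1:0 for i in range(n) }
--         for i in partition:
--             counts[i] += 1
--         tuples.append(counts)
--     return tuples
-- ===== SOURCE B (Python) =====
-- def partitions_as_dicts(n):
--     # Bottom-up dynamic programming: table[m][k-1] holds all partitions of m
--     # with parts >= k (as tuples, in the same order A's recursion emits them),
--     # so every (m, k) subproblem is computed exactly once instead of being
--     # recomputed throughout A's recursion tree.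
--     table = []
--     for m in range(n + 1):
--         row = []
--         for k in range(1, m + 1):
--             cell = [(m,)]
--             for i in range(m // 2, k - 1, -1):
--                 cell += [p + (i,) for p in table[m - i][i - 1]]
--             row.append(cell)
--         table.append(row)
--     parts = table[n][0] if n >= 1 else []
--     result = []
--     for partition in parts:
--         rle = {}
--         for i in partition:
--             rle[i] = rle.get(i, 0) + 1
--         result.append({j: rle.get(j, 0) for j in range(1, n + 1)})
--     return result
-- ===== Notes on version B (the rewrite author's own statement) =====
-- stated objective: alternative
-- what changed: A's recursive partitions(n,k) generator is replaced by an iterative bottom-up DP table over (m,k) subproblems (no recursion), and each multiplicity dict is built from a run-length counter plus a comprehension instead of zero-initialising keys 1..n and incrementing.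
import Mathlib
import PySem

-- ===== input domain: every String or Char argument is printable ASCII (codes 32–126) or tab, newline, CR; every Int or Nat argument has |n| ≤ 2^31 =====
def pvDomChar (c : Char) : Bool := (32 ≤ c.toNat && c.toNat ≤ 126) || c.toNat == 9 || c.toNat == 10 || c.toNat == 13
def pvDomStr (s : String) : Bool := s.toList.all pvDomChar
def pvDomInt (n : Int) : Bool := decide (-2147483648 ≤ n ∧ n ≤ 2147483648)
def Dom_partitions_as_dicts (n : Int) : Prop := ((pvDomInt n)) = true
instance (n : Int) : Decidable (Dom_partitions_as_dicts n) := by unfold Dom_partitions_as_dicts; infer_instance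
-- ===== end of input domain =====

-- B replaces A's recursive partition generator by an iterative bottom-up DP table over
-- (m, k) subproblems and builds each multiplicity dict from a run-length counter;
-- alternative structure, no speed claim.

-- ===== PORT A =====
-- partitions(n, k): fuel makes the recursion total; with fuel > n.toNat and k ≥ 1 the
-- fuel is never exhausted, so the port is exact on every call A's code performs.
def pyPartitions : Nat → Int → Int → List (List Int)
  | 0, _, _ => []
  | fuel+1, n, k =>
    (PySem.List.pyRange (PySem.Int.floordiv n 2) (k-1) (-1)).foldl
      (fun result i => result ++ (pyPartitions fuel (n-i) i).map (fun p => p ++ [i]))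
      (if k ≤ n then [[n]] else [])

def partitions_as_dicts (n : Int) : List (List (Int × Int)) :=
  (pyPartitions (n.toNat + 1) n 1).map (fun partition =>
    let counts0 : PySem.Dict Int Int :=
      (PySem.List.pyRange 0 n 1).foldl (fun d i => d.insert (i+1) 0) PySem.Dict.empty
    -- 'counts[i] += 1': every part i lies in 1..n, hence is a key of counts, so modify is exact
    let counts := partition.foldl (fun d i => d.modify i 0 (· + 1)) counts0
    counts.items)

-- ===== PORT B =====
def altCell (table : List (List (List (List Int)))) (m k : Int) : List (List Int) :=
  (PySem.List.pyRange (PySem.Int.floordiv m 2) (k-1) (-1)).foldl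
    (fun cell i =>
      cell ++ (PySem.List.pyGetD (PySem.List.pyGetD table (m-i) []) (i-1) []).map (fun p => p ++ [i]))
    [[m]]

def altRow (table : List (List (List (List Int)))) (m : Int) : List (List (List Int)) :=
  (PySem.List.pyRange 1 (m+1) 1).foldl (fun row k => row ++ [altCell table m k]) []

def altTable (n : Int) : List (List (List (List Int))) :=
  (PySem.List.pyRange 0 (n+1) 1).foldl (fun table m => table ++ [altRow table m]) []

def altConv (n : Int) (partition : List Int) : List (Int × Int) :=
  let rle : PySem.Dict Int Int :=
    partition.foldl (fun d i => d.insert i (d.getD i 0 + 1)) PySem.Dict.empty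
  -- dict comprehension over the distinct increasing keys 1..n: its items list is this map
  (PySem.List.pyRange 1 (n+1) 1).map (fun j => (j, rle.getD j 0))

def partitions_as_dicts_alt (n : Int) : List (List (Int × Int)) :=
  let parts :=
    if 1 ≤ n then PySem.List.pyGetD (PySem.List.pyGetD (altTable n) n []) 0 [] else []
  parts.map (altConv n)

-- ===== PRECONDITION & SPEC =====
def Spec_partitions_as_dicts (n : Int) (out : List (List (Int × Int))) : Prop := out = partitions_as_dicts_alt n
instance (n : Int) (out : List (List (Int × Int))) : Decidable (Spec_partitions_as_dicts n out) := by unfold Spec_partitions_as_dicts; infer_instance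

-- ===== CLAIM (what is proved, stated in full; the proofs are below) =====
def Claim_equal_partitions_as_dicts : Prop := ∀ (n : Int), Dom_partitions_as_dicts n → Spec_partitions_as_dicts n (partitions_as_dicts n)

-- ===== LEMMAS AND PROOFS =====

-- the table B has built after the first M iterations of its outer loop
def tbl : Nat → List (List (List (List Int)))
  | 0 => []
  | m+1 => tbl m ++ [altRow (tbl m) (m : Int)]

lemma length_tbl (M : Nat) : (tbl M).length = M := by
  induction M with
  | zero => rfl
  | succ m ih => simp [tbl, ih]

lemma altTable_eq (n : Int) : altTable n = tbl (n+1).toNat := by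
  unfold altTable
  rw [PySem.List.pyRange_one]
  rw [List.foldl_map]
  simp only [Int.sub_zero]
  generalize (n+1).toNat = N
  induction N with
  | zero => rfl
  | succ m ih => rw [List.range_succ, List.foldl_append, ih]; simp [tbl]

lemma tbl_get (M m : Nat) (h : m < M) : (tbl M)[m]? = some (altRow (tbl m) (m : Int)) := by
  induction M with
  | zero => omega
  | succ M ih =>
    by_cases hm : m < M
    · rw [tbl, List.getElem?_append_left (by rw [length_tbl]; omega)]
      exact ih hm
    · have : m = M := by omega
      subst this
      rw [tbl, List.getElem?_append_right (by rw [length_tbl])]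
      simp [length_tbl]

-- every part of a partition of n with min part k lies in [k, n]
lemma pyPartitions_parts : ∀ (f : Nat) (n k : Int) (p : List Int), 1 ≤ k →
    p ∈ pyPartitions f n k → ∀ i ∈ p, k ≤ i ∧ i ≤ n := by
  intro f
  induction f with
  | zero => intro n k p _ hp; simp [pyPartitions] at hp
  | succ f ih =>
    intro n k p hk hp i hi
    rw [pyPartitions, PySem.List.foldl_append_eq_flatMap] at hp
    rcases List.mem_append.mp hp with hb | hf
    · split at hb
      · simp at hb; subst hb; simp at hi; subst hi; omega
      · simp at hb
    · rcases List.mem_flatMap.mp hf with ⟨j, hj, hpj⟩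
      rw [PySem.List.mem_pyRange_neg_one] at hj
      rw [PySem.Int.floordiv_eq_ediv_of_pos (by omega)] at hj
      have hj1 : 1 ≤ j := by omega
      have hj2 : 2 * j ≤ n := by omega
      rcases List.mem_map.mp hpj with ⟨q, hq, rfl⟩
      rcases List.mem_append.mp hi with hiq | hij
      · have := ih (n - j) j q hj1 hq i hiq
        constructor <;> omega
      · simp at hij; subst hij; constructor <;> omega

-- B's cell (m, k) equals A's partitions(m, k)
lemma altCell_eq : ∀ (M : Nat) (m k : Int) (f : Nat), 0 ≤ m → m.toNat ≤ M → 1 ≤ k → k ≤ m →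
    m.toNat < f → altCell (tbl m.toNat) m k = pyPartitions f m k := by
  intro M
  induction M with
  | zero => intro m k f h0 hM hk hkm _; omega
  | succ M ih =>
    intro m k f h0 hM hk hkm hf
    match f with
    | 0 => omega
    | f+1 =>
      rw [altCell, pyPartitions, if_pos hkm]
      apply PySem.List.foldl_congr_mem
      intro acc i hi
      rw [PySem.List.mem_pyRange_neg_one] at hi
      rw [PySem.Int.floordiv_eq_ediv_of_pos (by omega)] at hi
      have h1 : 1 ≤ i := by omega
      have h2 : 2 * i ≤ m := by omega
      congr 1
      -- the inner lookup table[m-i][i-1] is the already-computed cell (m-i, i)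
      have hlt : (m - i).toNat < m.toNat := by omega
      have hrow : PySem.List.pyGetD (tbl m.toNat) (m - i) [] = altRow (tbl (m - i).toNat) (m - i) := by
        have hcast : (m - i) = (((m - i).toNat : Int)) := by omega
        rw [hcast, PySem.List.pyGetD_natCast, List.getD_eq_getElem?_getD,
            tbl_get m.toNat (m - i).toNat hlt]
        rw [Option.getD_some, ← hcast]
      rw [hrow]
      rw [altRow, PySem.List.foldl_append_singleton_eq_map, List.nil_append]
      have hidx : PySem.List.pyGetD
          ((PySem.List.pyRange 1 (m - i + 1) 1).map (fun k => altCell (tbl (m - i).toNat) (m - i) k))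
          (i - 1) [] = altCell (tbl (m - i).toNat) (m - i) i := by
        have h3 : (i - 1) = (((i-1).toNat : Int)) := by omega
        rw [h3, PySem.List.pyGetD_natCast]
        rw [List.getD_eq_getElem?_getD, List.getElem?_map,
            PySem.List.getElem?_pyRange_one]
        rw [if_pos (show (i-1).toNat < (m - i + 1 - 1).toNat by omega)]
        have h4 : (1 : Int) + (((i-1).toNat : Nat) : Int) = i := by omega
        simp only [Option.map_some, Option.getD_some, h4]
      rw [hidx]
      rw [ih (m - i) i f (by omega) (by omega) h1 (by omega) (by omega)]

-- A's dict building equals B's counter-based comprehension, for parts in 1..n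
lemma conv_eq (n : Int) (p : List Int) (hp : ∀ i ∈ p, 1 ≤ i ∧ i ≤ n) :
    ((p.foldl (fun d i => d.modify i 0 (· + 1))
        ((PySem.List.pyRange 0 n 1).foldl (fun d i => d.insert (i+1) 0)
          (PySem.Dict.empty : PySem.Dict Int Int))).items) = altConv n p := by
  set counts0 : PySem.Dict Int Int :=
    (PySem.List.pyRange 0 n 1).foldl (fun d i => d.insert (i+1) 0) PySem.Dict.empty with hc0
  have hitems0 : counts0.items = (PySem.List.pyRange 0 n 1).map (fun i => (i+1, (0 : Int))) := by
    rw [hc0, PySem.Dict.items_foldl_insert_fresh _ _ _ _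
          (fun a _ => PySem.Dict.contains_empty _)
          ((PySem.List.nodup_pyRange_one 0 n).map (fun a b h => by omega))]
    rfl
  have hkeys0 : counts0.keys = (PySem.List.pyRange 0 n 1).map (fun i => i+1) := by
    simp [PySem.Dict.keys, hitems0, Function.comp]
  have hnd0 : counts0.keys.Nodup := by
    rw [hkeys0]
    exact (PySem.List.nodup_pyRange_one 0 n).map (fun a b h => by omega)
  have hmem0 : ∀ i ∈ p, i ∈ counts0.keys := by
    intro i hi
    rw [hkeys0]
    rcases hp i hi with ⟨h1, h2⟩
    exact List.mem_map.mpr ⟨i - 1, by rw [PySem.List.mem_pyRange_one]; omega, by omega⟩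
  set counts := p.foldl (fun d i => d.modify i 0 (· + 1)) counts0 with hc
  have hkeys : counts.keys = counts0.keys := by
    rw [hc, PySem.Dict.keys_foldl_modify, PySem.Set.update_eq_append_filter]
    have : (PySem.Set.ofList p).filter (fun y => !(PySem.Set.contains counts0.keys y)) = [] := by
      rw [List.filter_eq_nil_iff]
      intro y hy
      have hym : y ∈ counts0.keys := hmem0 y ((PySem.Set.mem_ofList p y).mp hy)
      simpa using hym
    rw [this, List.append_nil]
  have hgetD0 : ∀ k ∈ counts0.keys, counts0.getD k 0 = 0 := by
    intro k hk
    rw [hkeys0] at hk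
    rcases List.mem_map.mp hk with ⟨i, _, rfl⟩
    refine PySem.Dict.getD_of_mem_items counts0 ?_ hnd0 0
    rw [hitems0]
    exact List.mem_map.mpr ⟨i, by assumption, rfl⟩
  have hgetD : ∀ k ∈ counts0.keys, counts.getD k 0 = (p.count k : Int) := by
    intro k hk
    rw [hc, PySem.Dict.getD_foldl_modify_add_one, hgetD0 k hk, zero_add]
  -- B's side: the fold is Counter, its getD is count
  have hrle : ∀ j : Int,
      (p.foldl (fun d i => d.insert i (d.getD i 0 + 1)) (PySem.Dict.empty : PySem.Dict Int Int)).getD j 0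
        = (p.count j : Int) := by
    intro j
    rw [PySem.Dict.foldl_insert_getD_add_one_eq_counter, PySem.Dict.getD_counter]
  rw [PySem.Dict.items_eq_map_keys counts (by rw [hkeys]; exact hnd0) 0, hkeys]
  unfold altConv
  simp only [hrle]
  rw [List.map_congr_left (fun k hk => by rw [hgetD k hk])]
  rw [hkeys0, List.map_map, PySem.List.pyRange_one, PySem.List.pyRange_one, List.map_map, List.map_map]
  have : (n - 0).toNat = (n + 1 - 1).toNat := by omega
  rw [this]
  apply List.map_congr_left
  intro k _
  have e : (0:Int) + (k:Int) + 1 = 1 + (k:Int) := by ring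
  simp only [Function.comp]
  rw [e]

lemma pyPartitions_nonpos (n : Int) (h : n ≤ 0) : pyPartitions (n.toNat + 1) n 1 = [] := by
  rw [pyPartitions, if_neg (by omega)]
  rw [PySem.List.pyRange_neg_one_eq_nil]
  · rfl
  · rw [PySem.Int.floordiv_eq_ediv_of_pos (by omega)]; omega

-- ===== VERDICT (by name: the statement is the Claim_ definition above) =====
theorem partitions_as_dicts_spec : Claim_equal_partitions_as_dicts := by
  intro n _
  unfold Spec_partitions_as_dicts partitions_as_dicts partitions_as_dicts_alt
  by_cases hn : 1 ≤ n
  · rw [if_pos hn]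
    have hparts : PySem.List.pyGetD (PySem.List.pyGetD (altTable n) n []) 0 []
        = pyPartitions (n.toNat + 1) n 1 := by
      rw [altTable_eq]
      have hrow : PySem.List.pyGetD (tbl (n+1).toNat) n [] = altRow (tbl n.toNat) n := by
        have hcast : n = ((n.toNat : Int)) := by omega
        rw [hcast, PySem.List.pyGetD_natCast, List.getD_eq_getElem?_getD]
        have e : (((n.toNat : Int)) + 1).toNat = n.toNat + 1 := by omega
        rw [e, tbl_get (n.toNat + 1) n.toNat (by omega)]
        rw [Option.getD_some, ← hcast]
      rw [hrow, altRow, PySem.List.foldl_append_singleton_eq_map, List.nil_append]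
      have hidx : PySem.List.pyGetD
          ((PySem.List.pyRange 1 (n + 1) 1).map (fun k => altCell (tbl n.toNat) n k))
          (0 : Int) [] = altCell (tbl n.toNat) n 1 := by
        have h0 : (0 : Int) = ((0 : Nat) : Int) := rfl
        rw [h0, PySem.List.pyGetD_natCast, List.getD_eq_getElem?_getD, List.getElem?_map,
            PySem.List.getElem?_pyRange_one]
        rw [if_pos (show (0:Nat) < (n + 1 - 1).toNat by omega)]
        simp
      rw [hidx]
      exact altCell_eq n.toNat n 1 (n.toNat + 1) (by omega) (le_refl _) (by omega) hn (by omega)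
    rw [hparts]
    apply List.map_congr_left
    intro p hp
    exact conv_eq n p (pyPartitions_parts (n.toNat + 1) n 1 p (by omega) hp)
  · rw [if_neg hn, pyPartitions_nonpos n (by omega)]
    rfl
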